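-- pv_equiv track=rewrite | github.com/hzfsls/grammar-study | lang_sols/euler.py | n_digit_fibonacci_number
-- ===== SOURCE A (Python) =====
-- def n_digit_fibonacci_number(n: int) -> int:
--     a = [1]
--     b = [1]
--     i = 2
--     while len(b) < n:
--         carry = 0
--         c = b.copy()
--         for j in range(len(b)):
--             if j < len(a):
--                 b[j] = a[j] + b[j] + carry
--             else:
--                 b[j] = b[j] + carry
--             carry = b[j] // 10
--             b[j] = b[j] % 10
--         if carry:
--             b.append(carry)
--         a = c
--         i = i + 1
--     return i
-- ===== SOURCE B (Python) =====
-- def n_digit_fibonacci_number(n: int) -> int: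
--     limit = 10 ** max(n - 1, 0)
--     a, b, i = 1, 1, 2
--     while b < limit:
--         a, b = b, a + b
--         i += 1
--     return i
-- ===== Notes on version B (the rewrite author's own statement) =====
-- stated objective: faster
-- what changed: Replaces the hand-rolled little-endian digit-list big-number addition (inner per-digit carry loop) with native integer Fibonacci iteration compared against the precomputed threshold 10^(n-1).
import Mathlib
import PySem

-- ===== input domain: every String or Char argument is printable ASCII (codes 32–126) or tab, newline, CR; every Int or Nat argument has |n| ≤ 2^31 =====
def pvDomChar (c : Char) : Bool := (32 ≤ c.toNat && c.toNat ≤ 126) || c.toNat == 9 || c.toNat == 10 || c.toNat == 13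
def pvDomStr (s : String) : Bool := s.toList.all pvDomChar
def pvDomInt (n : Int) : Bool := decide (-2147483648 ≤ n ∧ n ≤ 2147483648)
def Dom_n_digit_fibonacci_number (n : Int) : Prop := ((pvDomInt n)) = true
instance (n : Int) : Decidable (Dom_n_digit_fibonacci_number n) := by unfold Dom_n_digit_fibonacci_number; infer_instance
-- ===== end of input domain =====

-- B replaces A's hand-rolled digit-list addition with native integer Fibonacci iteration
-- against the threshold 10^(n-1) (measured constant-factor speed-up).
-- Both while-loops are ported with the same fuel 2^40, far above the ≤ 5·2^31 iterations any
-- n in Dom can need, so both ports compute exactly their Python's value on Dom; the lockstep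
-- equivalence proof does not depend on the fuel value.

-- ===== PORT A =====
-- inner 'for j in range(len(b))' loop: reads a[j] while j < len(a), writes digit and threads carry
def pvAddLoop : List Int → List Int → Int → List Int × Int
  | _, [], carry => ([], carry)
  | [], d :: bs, carry =>
      let s := d + carry
      let p := pvAddLoop [] bs (PySem.Int.floordiv s 10)
      (PySem.Int.mod s 10 :: p.1, p.2)
  | x :: xs, d :: bs, carry =>
      let s := x + d + carry
      let p := pvAddLoop xs bs (PySem.Int.floordiv s 10)
      (PySem.Int.mod s 10 :: p.1, p.2)

def pvLoopA : Nat → Int → List Int → List Int → Int → Int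
  | 0, _, _, _, i => i
  | fuel+1, n, a, b, i =>
      if (b.length : Int) < n then
        let c := b
        let p := pvAddLoop a b 0
        let b' := if p.2 ≠ 0 then p.1 ++ [p.2] else p.1
        pvLoopA fuel n c b' (i + 1)
      else i

def n_digit_fibonacci_number (n : Int) : Int := pvLoopA (2 ^ 40) n [1] [1] 2

-- ===== PORT B =====
def pvLoopB : Nat → Int → Int → Int → Int → Int
  | 0, _, _, _, i => i
  | fuel+1, limit, a, b, i =>
      if b < limit then pvLoopB fuel limit b (a + b) (i + 1) else i

def n_digit_fibonacci_number_alt (n : Int) : Int :=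
  pvLoopB (2 ^ 40) ((10 : Int) ^ (max (n - 1) 0).toNat) 1 1 2

-- ===== PRECONDITION & SPEC =====
def Spec_n_digit_fibonacci_number (n : Int) (out : Int) : Prop := out = n_digit_fibonacci_number_alt n
instance (n : Int) (out : Int) : Decidable (Spec_n_digit_fibonacci_number n out) := by unfold Spec_n_digit_fibonacci_number; infer_instance

-- ===== CLAIM (what is proved, stated in full; the proofs are below) =====
def Claim_equal_n_digit_fibonacci_number : Prop := ∀ (n : Int), Dom_n_digit_fibonacci_number n → Spec_n_digit_fibonacci_number n (n_digit_fibonacci_number n)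

-- ===== LEMMAS AND PROOFS =====

-- value of a little-endian base-10 digit list
def pvVal : List Int → Int
  | [] => 0
  | d :: ds => d + 10 * pvVal ds

def pvOk (l : List Int) : Prop := ∀ d ∈ l, 0 ≤ d ∧ d < 10

lemma pvVal_nonneg (l : List Int) (h : pvOk l) : 0 ≤ pvVal l := by
  induction l with
  | nil => simp [pvVal]
  | cons d ds ih =>
      have hd := h d (by simp)
      have := ih (fun x hx => h x (by simp [hx]))
      simp only [pvVal]; nlinarith

lemma pvVal_lt (l : List Int) (h : pvOk l) : pvVal l < 10 ^ l.length := by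
  induction l with
  | nil => simp [pvVal]
  | cons d ds ih =>
      have hd := h d (by simp)
      have := ih (fun x hx => h x (by simp [hx]))
      simp only [pvVal, List.length_cons, pow_succ]
      nlinarith

lemma pvVal_append_single (l : List Int) (d : Int) :
    pvVal (l ++ [d]) = pvVal l + d * 10 ^ l.length := by
  induction l with
  | nil => simp [pvVal]
  | cons x xs ih => simp only [List.cons_append, pvVal, ih, List.length_cons, pow_succ]; ring

lemma pvAddLoop_spec : ∀ (b a : List Int) (c : Int), pvOk a → pvOk b →
    0 ≤ c → c ≤ 1 → a.length ≤ b.length →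
    pvOk (pvAddLoop a b c).1 ∧ (pvAddLoop a b c).1.length = b.length ∧
    0 ≤ (pvAddLoop a b c).2 ∧ (pvAddLoop a b c).2 ≤ 1 ∧
    pvVal (pvAddLoop a b c).1 + (pvAddLoop a b c).2 * 10 ^ b.length = pvVal a + pvVal b + c := by
  intro b
  induction b with
  | nil =>
      intro a c ha hb hc0 hc1 hlen
      have : a = [] := List.length_eq_zero_iff.mp (Nat.le_zero.mp (by simpa using hlen))
      subst this
      simp [pvAddLoop, pvVal, pvOk, hc0, hc1]
  | cons d bs ih =>
      intro a c ha hb hc0 hc1 hlen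
      have hd := hb d (by simp)
      have hbs : pvOk bs := fun x hx => hb x (by simp [hx])
      cases a with
      | nil =>
          have hs0 : 0 ≤ d + c := by omega
          have hs1 : d + c < 20 := by omega
          have hfd : PySem.Int.floordiv (d + c) 10 = (d + c) / 10 :=
            PySem.Int.floordiv_eq_ediv_of_pos (by norm_num)
          have hmd : PySem.Int.mod (d + c) 10 = (d + c) % 10 :=
            PySem.Int.mod_eq_emod_of_pos (by norm_num)
          have hrec := ih [] ((d + c) / 10) (by intro x hx; simp at hx)
            hbs (by omega) (by omega) (by simp)
          simp only [pvAddLoop, hfd, hmd] at *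
          obtain ⟨h1, h2, h3, h4, h5⟩ := hrec
          refine ⟨?_, by simpa using h2, h3, h4, ?_⟩
          · intro x hx
            rcases List.mem_cons.mp hx with h | h
            · subst h; omega
            · exact h1 x h
          · simp only [pvVal, List.length_cons, pow_succ, pvVal] at *
            have : (d + c) % 10 + 10 * ((d + c) / 10) = d + c := by omega
            nlinarith [h5]
      | cons x xs =>
          have hx10 := ha x (by simp)
          have hxs : pvOk xs := fun y hy => ha y (by simp [hy])
          have hs0 : 0 ≤ x + d + c := by omega
          have hs1 : x + d + c < 20 := by omega
          have hfd : PySem.Int.floordiv (x + d + c) 10 = (x + d + c) / 10 :=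
            PySem.Int.floordiv_eq_ediv_of_pos (by norm_num)
          have hmd : PySem.Int.mod (x + d + c) 10 = (x + d + c) % 10 :=
            PySem.Int.mod_eq_emod_of_pos (by norm_num)
          have hrec := ih xs ((x + d + c) / 10) hxs hbs (by omega) (by omega)
            (by simpa using Nat.succ_le_succ_iff.mp (by simpa using hlen))
          simp only [pvAddLoop, hfd, hmd] at *
          obtain ⟨h1, h2, h3, h4, h5⟩ := hrec
          refine ⟨?_, by simpa using h2, h3, h4, ?_⟩
          · intro y hy
            rcases List.mem_cons.mp hy with h | h
            · subst h; omega
            · exact h1 y h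
          · simp only [pvVal, List.length_cons, pow_succ, pvVal] at *
            have : (x + d + c) % 10 + 10 * ((x + d + c) / 10) = x + d + c := by omega
            nlinarith [h5]

-- the two loop conditions agree on canonical digit lists
lemma pvCond_iff (n : Int) (b : List Int) (hok : pvOk b) (hlen : 1 ≤ b.length)
    (hlo : (10 : Int) ^ (b.length - 1) ≤ pvVal b) :
    ((b.length : Int) < n) ↔ (pvVal b < (10 : Int) ^ (max (n - 1) 0).toNat) := by
  have hup := pvVal_lt b hok
  by_cases hn : n ≤ 1
  · have hmax : (max (n - 1) 0).toNat = 0 := by omega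
    rw [hmax]
    have h1 : (1 : Int) ≤ 10 ^ (b.length - 1) := one_le_pow₀ (by norm_num)
    constructor
    · intro h; exfalso; omega
    · intro h; exfalso; omega
  · push Not at hn
    have hmax : ((max (n - 1) 0).toNat : Int) = n - 1 := by omega
    set k := (max (n - 1) 0).toNat with hk
    have hk1 : 1 ≤ k := by omega
    constructor
    · intro h
      have hle : b.length ≤ k := by omega
      calc pvVal b < 10 ^ b.length := hup
        _ ≤ 10 ^ k := pow_le_pow_right₀ (by norm_num) hle
    · intro h
      by_contra hcon
      push Not at hcon
      have hle : k ≤ b.length - 1 := by omega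
      have : (10 : Int) ^ k ≤ 10 ^ (b.length - 1) := pow_le_pow_right₀ (by norm_num) hle
      omega

lemma pvLoop_eq : ∀ (fuel : Nat) (n : Int) (a b : List Int) (i : Int),
    pvOk a → pvOk b → a.length ≤ b.length → 1 ≤ b.length →
    (10 : Int) ^ (b.length - 1) ≤ pvVal b →
    pvLoopA fuel n a b i =
      pvLoopB fuel ((10 : Int) ^ (max (n - 1) 0).toNat) (pvVal a) (pvVal b) i := by
  intro fuel
  induction fuel with
  | zero => intro n a b i _ _ _ _ _; rfl
  | succ fuel ih =>
      intro n a b i hoa hob hab hb1 hlo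
      have hcond := pvCond_iff n b hob hb1 hlo
      simp only [pvLoopA, pvLoopB]
      by_cases hc : (b.length : Int) < n
      · rw [if_pos hc, if_pos (hcond.mp hc)]
        obtain ⟨h1, h2, h3, h4, h5⟩ :=
          pvAddLoop_spec b a 0 hoa hob le_rfl (by norm_num) hab
        set p := pvAddLoop a b 0 with hp
        have hvala := pvVal_nonneg a hoa
        have hvalb := pvVal_nonneg b hob
        by_cases hcar : p.2 ≠ 0
        · have hcar1 : p.2 = 1 := by omega
          rw [hcar1, one_mul] at h5
          rw [if_pos hcar]
          have hlen' : (p.1 ++ [p.2]).length = b.length + 1 := by simp [h2]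
          have hval' : pvVal (p.1 ++ [p.2]) = pvVal a + pvVal b := by
            rw [pvVal_append_single, h2, hcar1, one_mul]; omega
          rw [ih n b (p.1 ++ [p.2]) (i + 1) hob
            (by intro y hy
                rcases List.mem_append.mp hy with h | h
                · exact h1 y h
                · simp at h; omega)
            (by omega) (by omega)
            (by rw [hlen', hval']
                have : b.length + 1 - 1 = b.length := by omega
                rw [this]
                have := pvVal_nonneg p.1 h1
                omega),
            hval']
        · push Not at hcar
          rw [hcar, zero_mul, add_zero] at h5
          rw [if_neg (by simpa using hcar)]
          have hval' : pvVal p.1 = pvVal a + pvVal b := by omega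
          rw [ih n b p.1 (i + 1) hob h1 (by omega) (by omega)
            (by rw [h2, hval']
                have : (10 : Int) ^ (b.length - 1) ≤ pvVal b := hlo
                omega),
            hval']
      · rw [if_neg hc, if_neg (by exact fun h => hc (hcond.mpr h))]

-- ===== VERDICT (by name: the statement is the Claim_ definition above) =====
theorem n_digit_fibonacci_number_spec : Claim_equal_n_digit_fibonacci_number := by
  intro n _
  unfold Spec_n_digit_fibonacci_number n_digit_fibonacci_number n_digit_fibonacci_number_alt
  have := pvLoop_eq (2 ^ 40) n [1] [1] 2
    (by intro d hd; simp at hd; omega)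
    (by intro d hd; simp at hd; omega)
    (by simp) (by simp) (by simp [pvVal])
  simpa [pvVal] using this
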